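-- pv_equiv track=rewrite | github.com/katharinekowalyshyn/incontext-bayesians | src/metrics/seen_heldout_edges.py | observed_neighbors_for_token
-- ===== SOURCE A (Python) =====
-- from collections.abc import Sequence
--
-- def observed_neighbors_for_token(context: Sequence[str], token: str) -> set[str]:
--     """Neighbors that appeared in an observed transition involving ``token``.
--
--     The graph hypotheses are undirected, so either transition direction counts
--     as an observed edge involving the final token.
--     """
--
--     observed: set[str] = set()
--     for left, right in zip(context[:-1], context[1:]):
--         if left == token and right != token:
--             observed.add(right)
--         if right == token and left != token:
--             observed.add(left)
--     return observed
-- ===== SOURCE B (Python) =====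
-- def observed_neighbors_for_token(context, token):
--     """Neighbors that appeared in an observed transition involving ``token``.
--
--     Staged: first build the set of indices at which ``token`` occurs, then
--     keep every element standing next to one of those occurrences (and not
--     equal to the token itself).
--     """
--     occ = {i for i, t in enumerate(context) if t == token}
--     return {t for i, t in enumerate(context)
--             if t != token and (i - 1 in occ or i + 1 in occ)}
-- ===== Notes on version B (the rewrite author's own statement) =====
-- stated objective: alternative
-- what changed: B stages the computation: it first builds the set of indices where token occurs, then selects by comprehension every element adjacent to such an index (and different from token), instead of A's single pass over zipped adjacent pairs with two directional membership checks per pair.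
import Mathlib
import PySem

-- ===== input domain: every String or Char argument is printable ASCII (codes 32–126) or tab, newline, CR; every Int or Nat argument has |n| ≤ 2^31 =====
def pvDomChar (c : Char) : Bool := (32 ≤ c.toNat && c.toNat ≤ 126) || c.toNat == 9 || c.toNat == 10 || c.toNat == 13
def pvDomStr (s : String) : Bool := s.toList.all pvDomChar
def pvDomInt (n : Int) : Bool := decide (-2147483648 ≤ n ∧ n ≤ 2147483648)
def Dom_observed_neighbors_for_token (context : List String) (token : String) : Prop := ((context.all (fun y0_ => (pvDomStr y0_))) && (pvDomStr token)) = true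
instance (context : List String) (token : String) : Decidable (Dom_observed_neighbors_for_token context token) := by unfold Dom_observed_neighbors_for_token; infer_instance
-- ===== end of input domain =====

-- B stages the work: first the set of indices where token occurs, then a filter of positions adjacent to an occurrence — instead of A's pass over zipped adjacent pairs; alternative decomposition, same cost.


-- ===== PORT A =====
-- one step of A's loop body on a pair (left, right)
def pvStepA (token : String) (observed : List String) (p : String × String) : List String :=
  let observed := if p.1 == token && p.2 != token then PySem.Set.add observed p.2 else observed
  if p.2 == token && p.1 != token then PySem.Set.add observed p.1 else observed

def observed_neighbors_for_token (context : List String) (token : String) : List String :=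
  (List.zip (PySem.List.slice context none (some (-1))) (PySem.List.slice context (some 1) none)).foldl
    (pvStepA token) PySem.Set.empty

-- ===== PORT B =====
-- occ = {i for i, t in enumerate(context) if t == token}
def pvOcc (context : List String) (token : String) : PySem.Set Int :=
  (PySem.List.enumerate context 0).foldl
    (fun acc p => if p.2 == token then PySem.Set.add acc p.1 else acc) PySem.Set.empty

-- one step of B's result comprehension at enumerate entry (i, t)
def pvStepB (occ : PySem.Set Int) (token : String) (acc : List String) (p : Int × String) : List String :=
  if p.2 != token && (PySem.Set.contains occ (p.1 - 1) || PySem.Set.contains occ (p.1 + 1)) then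
    PySem.Set.add acc p.2
  else acc

def observed_neighbors_for_token_alt (context : List String) (token : String) : List String :=
  (PySem.List.enumerate context 0).foldl (pvStepB (pvOcc context token) token) PySem.Set.empty

-- ===== PRECONDITION & SPEC =====
def Spec_observed_neighbors_for_token (context : List String) (token : String) (out : List String) : Prop := out = observed_neighbors_for_token_alt context token
instance (context : List String) (token : String) (out : List String) : Decidable (Spec_observed_neighbors_for_token context token out) := by unfold Spec_observed_neighbors_for_token; infer_instance

-- ===== CLAIM (what is proved, stated in full; the proofs are below) =====
def Claim_equal_observed_neighbors_for_token : Prop := ∀ (context : List String) (token : String), Dom_observed_neighbors_for_token context token → Spec_observed_neighbors_for_token context token (observed_neighbors_for_token context token)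

-- ===== LEMMAS AND PROOFS =====

-- a fold that adds f b only when p b holds is the plain add-fold over the filtered list
lemma pvFoldl_addIf_eq_filter {α β : Type} [BEq α] (p : β → Bool) (f : β → α) (l : List β)
    (s : List α) :
    l.foldl (fun acc b => if p b then PySem.Set.add acc (f b) else acc) s
      = (l.filter p).foldl (fun acc b => PySem.Set.add acc (f b)) s := by
  induction l generalizing s with
  | nil => rfl
  | cons x xs ih => by_cases h : p x <;> simp [h, ih]

-- membership in B's occurrence-index set
lemma pvMem_occ (context : List String) (token : String) (x : Int) :
    x ∈ pvOcc context token ↔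
      ∃ k : Nat, k < context.length ∧ x = (k : Int) ∧ context.getD k "" = token := by
  unfold pvOcc
  rw [pvFoldl_addIf_eq_filter (fun p => p.2 == token) Prod.fst]
  rw [PySem.Set.mem_foldl_add]
  simp only [PySem.Set.empty, List.not_mem_nil, false_or, List.mem_filter,
    PySem.List.mem_enumerate_iff]
  constructor
  · rintro ⟨b, ⟨⟨k, hk, rfl⟩, hb⟩, rfl⟩
    refine ⟨k, hk, by simp, ?_⟩
    simp only [beq_iff_eq] at hb
    rw [List.getD_eq_getElem _ _ hk]; exact hb
  · rintro ⟨k, hk, rfl, hv⟩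
    refine ⟨((k : Int), context[k]), ⟨⟨k, hk, by simp⟩, ?_⟩, rfl⟩
    simp only [beq_iff_eq]
    rw [List.getD_eq_getElem _ _ hk] at hv; exact hv

lemma pvContains_left (context : List String) (token : String) (i : Nat) (hi : i < context.length) :
    PySem.Set.contains (pvOcc context token) ((i : Int) - 1)
      = (decide (0 < i) && (context.getD (i - 1) "" == token)) := by
  rw [Bool.eq_iff_iff, PySem.Set.contains_iff, pvMem_occ]
  simp only [Bool.and_eq_true, decide_eq_true_eq, beq_iff_eq]
  constructor
  · rintro ⟨k, hk, hx, hv⟩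
    have h0 : 0 < i := by omega
    have hki : k = i - 1 := by omega
    exact ⟨h0, by rw [← hki]; exact hv⟩
  · rintro ⟨h0, hv⟩
    exact ⟨i - 1, by omega, by omega, hv⟩

lemma pvContains_right (context : List String) (token : String) (i : Nat) :
    PySem.Set.contains (pvOcc context token) ((i : Int) + 1)
      = (decide (i + 1 < context.length) && (context.getD (i + 1) "" == token)) := by
  rw [Bool.eq_iff_iff, PySem.Set.contains_iff, pvMem_occ]
  simp only [Bool.and_eq_true, decide_eq_true_eq, beq_iff_eq]
  constructor
  · rintro ⟨k, hk, hx, hv⟩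
    have hki : k = i + 1 := by omega
    exact ⟨by omega, by rw [← hki]; exact hv⟩
  · rintro ⟨h0, hv⟩
    exact ⟨i + 1, h0, by omega, hv⟩

-- B's step at a Nat index below the length, with the occurrence test made explicit
def pvFullNat (context : List String) (token : String) (acc : List String) (i : Nat) : List String :=
  if (context.getD i "" != token)
      && ((decide (0 < i) && (context.getD (i - 1) "" == token))
          || (decide (i + 1 < context.length) && (context.getD (i + 1) "" == token))) then
    PySem.Set.add acc (context.getD i "")
  else acc

lemma pvStepB_cast (context : List String) (token : String) (acc : List String) (i : Nat)
    (hi : i < context.length) :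
    pvStepB (pvOcc context token) token acc ((i : Int), PySem.List.pyGetD context (i : Int) "")
      = pvFullNat context token acc i := by
  unfold pvStepB pvFullNat
  rw [pvContains_left context token i hi, pvContains_right context token i]
  simp only [PySem.List.pyGetD_natCast]

-- adding the same element twice is adding it once
lemma pvAdd_add_self {α : Type} [BEq α] [LawfulBEq α] (s : List α) (x : α) :
    PySem.Set.add (PySem.Set.add s x) x = PySem.Set.add s x := by
  rw [PySem.Set.add_of_mem]
  exact (PySem.Set.mem_add _ _ _).mpr (Or.inr rfl)

-- the "add the left neighbor of a token occurrence at position i" half-event;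
-- A performs it while processing pair i-1 (its first add)
def pvApplyL (context : List String) (token : String) (i : Nat) (acc : List String) : List String :=
  if decide (i < context.length) && decide (0 < i) && (context.getD (i - 1) "" == token) && (context.getD i "" != token)
  then PySem.Set.add acc (context.getD i "")
  else acc

lemma pvStep_last (context : List String) (token : String) (acc : List String) (i : Nat)
    (hi : i + 1 = context.length) :
    pvFullNat context token acc i = pvApplyL context token i acc := by
  unfold pvFullNat pvApplyL
  have hR : ¬ (i + 1 < context.length) := by omega
  have hlt : i < context.length := by omega
  simp only [hR, decide_false, hlt, decide_true, Bool.false_and, Bool.or_false, Bool.true_and]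
  split_ifs with h1 h2 <;> simp_all

lemma pvStep_mid (context : List String) (token : String) (acc : List String) (i : Nat)
    (hi : i + 1 < context.length) :
    pvApplyL context token (i + 1) (pvFullNat context token acc i)
      = pvStepA token (pvApplyL context token i acc) (context.getD i "", context.getD (i + 1) "") := by
  unfold pvFullNat pvApplyL pvStepA
  have h1 : i + 1 < context.length := hi
  have h2 : 0 < i + 1 := by omega
  have h3 : i < context.length := by omega
  have h4 : i + 1 - 1 = i := by omega
  simp only [h1, h2, h3, h4, decide_true, Bool.true_and]
  by_cases hct : (context.getD i "" == token) = true <;>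
    by_cases hct2 : (context.getD (i + 1) "" == token) = true <;>
      by_cases hcl : (decide (0 < i) && (context.getD (i - 1) "" == token)) = true <;>
        simp_all [bne_iff_ne]
  split_ifs
  · exact (pvAdd_add_self acc _).symm
  · rfl

lemma pvKey (context : List String) (token : String) :
    ∀ (k i : Nat) (acc : List String), context.length - i = k → i ≤ context.length →
      (PySem.List.pyRange (i : Int) (context.length : Int) 1).foldl
          (fun acc j => pvStepB (pvOcc context token) token acc (j, PySem.List.pyGetD context j ""))
          acc
        = ((List.zip context.dropLast context.tail).drop i).foldl (pvStepA token)
            (pvApplyL context token i acc) := by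
  intro k
  induction k with
  | zero =>
    intro i acc hk hle
    have hin : i = context.length := by omega
    subst hin
    rw [PySem.List.pyRange_one_eq_nil (by omega)]
    rw [List.drop_eq_nil_of_le
      (by simp only [List.length_zip, List.length_dropLast, List.length_tail]; omega)]
    simp [pvApplyL]
  | succ k ih =>
    intro i acc hk hle
    have hi : i < context.length := by omega
    rw [PySem.List.pyRange_one_cons (by exact_mod_cast hi)]
    simp only [List.foldl_cons]
    rw [pvStepB_cast context token acc i hi]
    have hcast : (i : Int) + 1 = ((i + 1 : Nat) : Int) := by omega
    rw [hcast, ih (i + 1) (pvFullNat context token acc i) (by omega) (by omega)]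
    have hz : (List.zip context.dropLast context.tail).length = context.length - 1 := by
      simp [List.length_zip, List.length_dropLast, List.length_tail]
    by_cases hlast : i + 1 = context.length
    · rw [List.drop_eq_nil_of_le (by omega), List.drop_eq_nil_of_le (by omega)]
      simp only [List.foldl_nil]
      have hnot : ¬ (i + 1 < context.length) := by omega
      rw [pvStep_last context token acc i hlast]
      unfold pvApplyL
      simp [hnot]
    · have hmid : i + 1 < context.length := by omega
      have hzi : i < (List.zip context.dropLast context.tail).length := by omega
      rw [List.drop_eq_getElem_cons hzi]
      simp only [List.foldl_cons]
      have e1 : context[i]? = some context[i] := List.getElem?_eq_getElem (by omega)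
      have e2 : context[i + 1]? = some context[i + 1] := List.getElem?_eq_getElem (by omega)
      have hpair : (List.zip context.dropLast context.tail)[i]
          = (context.getD i "", context.getD (i + 1) "") := by
        have h1 : i < context.dropLast.length := by simp [List.length_dropLast]; omega
        have h2 : i < context.tail.length := by simp [List.length_tail]; omega
        simp [List.getElem_zip, List.getElem_dropLast, List.getElem_tail, List.getD, e1, e2]
      rw [hpair, pvStep_mid context token acc i hmid]

theorem pv_main (context : List String) (token : String) :
    observed_neighbors_for_token context token = observed_neighbors_for_token_alt context token := by
  unfold observed_neighbors_for_token observed_neighbors_for_token_alt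
  rw [PySem.List.slice_to_neg_one, PySem.List.slice_from_one]
  rw [PySem.List.enumerate_eq_map_pyRange context ""]
  rw [List.foldl_map]
  have h := pvKey context token context.length 0 PySem.Set.empty (by omega) (by omega)
  simp only [Nat.cast_zero] at h
  simp only [PySem.List.len] at *
  rw [h]
  simp [pvApplyL]

-- ===== VERDICT (by name: the statement is the Claim_ definition above) =====
theorem observed_neighbors_for_token_spec : Claim_equal_observed_neighbors_for_token := by
  intro context token _
  unfold Spec_observed_neighbors_for_token
  exact pv_main context token
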